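-- pv_equiv track=rewrite | github.com/Msh-19/Algo-competitive-programming | A2SV G5 - Contest #15 07-May-2024/C - ANDy Session 142697.py | maximize_AND
-- ===== SOURCE A (Python) =====
-- def maximize_AND(n, k, a):
--     sums = 0
--     for i in range(30,-1,-1):
--         po = pow(2,i)
--
--         p = 0
--         for j in range(n):
--             val = po&a[j]
--
--             if val == 0:
--                 p+=1
--
--         if p<=k:
--             k -= p
--             sums += po
--
--     return sums
-- ===== SOURCE B (Python) =====
-- def maximize_AND(n, k, a):
--     # count table: miss[i] = how many of the first n numbers lack bit i
--     miss = [0] * 31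
--     for x in a[:max(n, 0)]:
--         miss = [m + (1 - ((x >> i) & 1)) for i, m in enumerate(miss)]
--     sums = 0
--     for i in range(30, -1, -1):
--         p = miss[i]
--         if p <= k:
--             k -= p
--             sums += 2 ** i
--     return sums
-- ===== Notes on version B (the rewrite author's own statement) =====
-- stated objective: alternative
-- what changed: One pass over the used prefix builds a 31-entry table miss[i] of how many numbers lack bit i, then a separate greedy pass over bits 30..0 reads the table, replacing A's per-bit rescan of the whole prefix.
import Mathlib
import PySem

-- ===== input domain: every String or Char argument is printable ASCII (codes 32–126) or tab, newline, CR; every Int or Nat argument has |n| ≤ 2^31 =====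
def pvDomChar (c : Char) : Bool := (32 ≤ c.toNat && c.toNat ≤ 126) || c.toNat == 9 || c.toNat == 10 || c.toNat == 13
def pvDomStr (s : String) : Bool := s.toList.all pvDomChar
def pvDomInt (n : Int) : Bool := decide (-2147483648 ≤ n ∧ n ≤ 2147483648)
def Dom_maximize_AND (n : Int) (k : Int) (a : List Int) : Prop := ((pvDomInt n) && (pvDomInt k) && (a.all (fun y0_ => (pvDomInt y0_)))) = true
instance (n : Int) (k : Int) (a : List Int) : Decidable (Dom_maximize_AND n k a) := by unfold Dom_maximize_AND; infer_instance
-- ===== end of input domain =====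

-- B replaces A's per-bit rescan of the array by one pass building a 31-entry
-- missing-bit count table followed by a separate greedy pass over the table (alternative decomposition).


-- ===== PORT A =====
def maximize_AND (n : Int) (k : Int) (a : List Int) : Int :=
  -- for i in range(30,-1,-1): state (sums, k)
  ((PySem.List.pyRange 30 (-1) (-1)).foldl
    (fun (st : Int × Int) i =>
      let po : Int := 2 ^ i.toNat   -- pow(2, i); i ≥ 0 along this range
      let p : Int := (PySem.List.pyRange 0 n 1).foldl
        (fun p j =>
          let val := PySem.Int.band po (PySem.List.pyGetD a j 0)  -- a[j]; in range under Pre_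
          if val = 0 then p + 1 else p) 0
      if p ≤ st.2 then (st.1 + po, st.2 - p) else st)
    (0, k)).1

-- ===== PORT B =====
-- helper: Source B's comprehension  [m + (1 - ((x >> i) & 1)) for i, m in enumerate(miss)]
def pvMissStep (x : Int) (miss : List Int) : List Int :=
  (PySem.List.enumerate miss).map (fun im => im.2 + (1 - PySem.Int.band (x >>> im.1.toNat) 1))

def maximize_AND_alt (n : Int) (k : Int) (a : List Int) : Int :=
  -- miss = [0]*31; one pass over a[:max(n,0)] rebuilding the table by comprehension
  let miss : List Int :=
    (PySem.List.slice a none (some (max n 0))).foldl (fun miss x => pvMissStep x miss) (List.replicate 31 0)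
  -- greedy pass over bits 30..0 reading the table
  ((PySem.List.pyRange 30 (-1) (-1)).foldl
    (fun (st : Int × Int) i =>
      let p : Int := PySem.List.pyGetD miss i 0   -- miss[i]; 0 ≤ i ≤ 30 along this range
      if p ≤ st.2 then (st.1 + 2 ^ i.toNat, st.2 - p) else st)
    (0, k)).1

-- ===== PRECONDITION & SPEC =====
-- Pre_ excludes exactly n > len(a), where A raises IndexError reading a[j].
def Pre_maximize_AND (n : Int) (k : Int) (a : List Int) : Prop :=
  n ≤ (a.length : Int)
instance (n : Int) (k : Int) (a : List Int) : Decidable (Pre_maximize_AND n k a) := by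
  unfold Pre_maximize_AND; infer_instance

def pvWitness_maximize_AND : Int × Int × List Int := (2, 1, [3, 1])

def Spec_maximize_AND (n : Int) (k : Int) (a : List Int) (out : Int) : Prop := out = maximize_AND_alt n k a
instance (n : Int) (k : Int) (a : List Int) (out : Int) : Decidable (Spec_maximize_AND n k a out) := by unfold Spec_maximize_AND; infer_instance

-- ===== CLAIM (what is proved, stated in full; the proofs are below) =====
def Claim_equal_maximize_AND : Prop := ∀ (n : Int) (k : Int) (a : List Int), Dom_maximize_AND n k a → Pre_maximize_AND n k a → Spec_maximize_AND n k a (maximize_AND n k a)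

-- ===== LEMMAS AND PROOFS =====


theorem pv_band_one_01 (y : Int) : PySem.Int.band y 1 = 0 ∨ PySem.Int.band y 1 = 1 := by
  unfold PySem.Int.band
  split_ifs with h1 h2 h2
  · have h : Int.toNat 1 = 1 := rfl
    rw [h, Nat.and_one_is_mod]
    have := Nat.mod_two_eq_zero_or_one y.toNat
    omega
  · omega
  · have h : Int.toNat 1 = 1 := rfl
    rw [h, Nat.one_and_eq_mod_two]
    have := Nat.mod_two_eq_zero_or_one (-y - 1).toNat
    omega
  · omega

theorem pv_band_negSucc_two_pow (m i : Nat) :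
    PySem.Int.band ((2:Int) ^ i) (Int.negSucc m) = ((2 ^ i - (2 ^ i &&& m) : Nat) : Int) := by
  have hneg : ¬ (0:Int) ≤ Int.negSucc m := by simp [Int.negSucc_eq]; omega
  have hm : (-(Int.negSucc m) - 1).toNat = m := by simp [Int.negSucc_eq]
  have ht : ((2:Int) ^ i).toNat = 2 ^ i := by
    rw [show ((2:Int) ^ i) = ((2 ^ i : Nat) : Int) by push_cast; ring, Int.toNat_natCast]
  unfold PySem.Int.band
  rw [if_pos (by positivity), if_neg hneg, hm, ht]

theorem pv_band_negSucc_one (m : Nat) :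
    PySem.Int.band (Int.negSucc m) 1 = ((1 - (1 &&& m) : Nat) : Int) := by
  have hneg : ¬ (0:Int) ≤ Int.negSucc m := by simp [Int.negSucc_eq]; omega
  have hm : (-(Int.negSucc m) - 1).toNat = m := by simp [Int.negSucc_eq]
  unfold PySem.Int.band
  rw [if_neg hneg, if_pos (by norm_num), hm]
  rfl

theorem pv_bit_iff (x : Int) (i : Nat) :
    (PySem.Int.band ((2:Int) ^ i) x = 0) ↔ (PySem.Int.band (x >>> i) 1 = 0) := by
  cases x with
  | ofNat m =>
    have hs : (Int.ofNat m) >>> i = Int.ofNat (m >>> i) := rfl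
    have e1 : PySem.Int.band ((2:Int) ^ i) (Int.ofNat m) = ((2 ^ i &&& m : Nat) : Int) := by
      rw [show ((2:Int) ^ i) = ((2 ^ i : Nat) : Int) by push_cast; ring]
      simpa using PySem.Int.band_natCast (2 ^ i) m
    have e2 : PySem.Int.band (Int.ofNat (m >>> i)) 1 = (((m >>> i) &&& 1 : Nat) : Int) := by
      simpa using PySem.Int.band_natCast (m >>> i) 1
    rw [hs, e1, e2, Nat.two_pow_and, Nat.and_one_is_mod, Nat.shiftRight_eq_div_pow]
    have htb := @Nat.testBit_eq_decide_div_mod_eq i m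
    have hq := Nat.mod_two_eq_zero_or_one (m / 2 ^ i)
    have hpow : (2:Nat) ^ i ≠ 0 := Nat.pos_iff_ne_zero.mp (Nat.two_pow_pos i)
    rcases hb : m.testBit i with _ | _ <;> rw [hb] at htb <;> simp at htb <;> simp [htb]
  | negSucc m =>
    have hs : (Int.negSucc m) >>> i = Int.negSucc (m >>> i) := rfl
    rw [hs, pv_band_negSucc_two_pow, pv_band_negSucc_one, Nat.two_pow_and,
        Nat.one_and_eq_mod_two, Nat.shiftRight_eq_div_pow]
    have htb := @Nat.testBit_eq_decide_div_mod_eq i m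
    have hq := Nat.mod_two_eq_zero_or_one (m / 2 ^ i)
    have hpow : (2:Nat) ^ i ≠ 0 := Nat.pos_iff_ne_zero.mp (Nat.two_pow_pos i)
    rcases hb : m.testBit i with _ | _ <;> rw [hb] at htb <;> simp at htb <;> simp [htb]

theorem pv_enumerate_map_range (N : Nat) (g : Nat → Int) :
    PySem.List.enumerate ((List.range N).map g)
      = (List.range N).map (fun (i : Nat) => ((i : Int), g i)) := by
  induction N with
  | zero => simp
  | succ N ih =>
    rw [List.range_succ, List.map_append, List.map_append, PySem.List.enumerate_append, ih]
    simp [PySem.List.enumerate_cons, PySem.List.enumerate_nil]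

theorem pv_step2 (N : Nat) (g : Nat → Int) (x : Int) :
    pvMissStep x ((List.range N).map g)
      = (List.range N).map (fun i => g i + (1 - PySem.Int.band (x >>> i) 1)) := by
  unfold pvMissStep
  rw [pv_enumerate_map_range, List.map_map]
  refine List.map_congr_left ?_
  intro a _
  simp [Int.shiftRight_natCast_right]

theorem pv_bit_ite (x : Int) (i : Nat) :
    1 - PySem.Int.band (x >>> i) 1
      = if PySem.Int.band ((2:Int) ^ i) x = 0 then 1 else 0 := by
  rcases pv_band_one_01 (x >>> i) with h | h <;>
    simp [pv_bit_iff x i, h]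

theorem pv_fold_table (t : List Int) (g : Nat → Int) :
    t.foldl (fun miss x => pvMissStep x miss) ((List.range 31).map g)
    = (List.range 31).map
        (fun i => g i + ((t.countP (fun x => PySem.Int.band ((2:Int) ^ i) x = 0) : Nat) : Int)) := by
  induction t generalizing g with
  | nil => simp
  | cons x t ih =>
    rw [List.foldl_cons, pv_step2, ih]
    refine List.map_congr_left ?_
    intro i _
    rw [pv_bit_ite, List.countP_cons]
    by_cases h : PySem.Int.band ((2:Int) ^ i) x = 0
    · simp [h]; ring
    · simp [h]

theorem pv_main (n : Int) (k : Int) (a : List Int)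
    (hnlen : n ≤ (a.length : Int)) :
    maximize_AND n k a = maximize_AND_alt n k a := by
  unfold maximize_AND maximize_AND_alt
  have hslice : PySem.List.slice a none (some (max n 0)) = a.take n.toNat := by
    rw [PySem.List.slice_to a (le_max_right n 0)]
    congr 1
    omega
  have htlen : (a.take n.toNat).length = n.toNat := by rw [List.length_take]; omega
  have hrep : (List.replicate 31 (0:Int)) = (List.range 31).map (fun _ => (0:Int)) := by
    simp
  rw [hslice, hrep, pv_fold_table]
  have hinner : ∀ po : Int,
      (PySem.List.pyRange 0 n 1).foldl
        (fun p j => if PySem.Int.band po (PySem.List.pyGetD a j 0) = 0 then p + 1 else p) 0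
      = (((a.take n.toNat).countP (fun x => PySem.Int.band po x = 0) : Nat) : Int) := by
    intro po
    have hrange : PySem.List.pyRange 0 n 1
          = PySem.List.pyRange 0 (PySem.List.len (a.take n.toNat)) 1 := by
      rw [PySem.List.pyRange_one, PySem.List.pyRange_one]
      have : (n - 0).toNat = ((PySem.List.len (a.take n.toNat)) - 0).toNat := by
        simp [htlen]
        omega
      rw [this]
    rw [hrange]
    have hcongr : ∀ (x : Int), x ∈ PySem.List.pyRange 0 (PySem.List.len (a.take n.toNat)) 1 →
        ∀ (p : Int),
        (if PySem.Int.band po (PySem.List.pyGetD a x 0) = 0 then p + 1 else p)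
          = (if PySem.Int.band po (PySem.List.pyGetD (a.take n.toNat) x 0) = 0 then p + 1 else p) := by
      intro j hj p
      obtain ⟨hj0, hjlt⟩ := PySem.List.mem_pyRange_one.mp hj
      have hjlt' : j.toNat < n.toNat := by
        simp [htlen] at hjlt; omega
      have : PySem.List.pyGetD a j 0 = PySem.List.pyGetD (a.take n.toNat) j 0 := by
        rw [PySem.List.pyGetD_of_nonneg a 0 hj0, PySem.List.pyGetD_of_nonneg _ 0 hj0]
        have h1 : j.toNat < a.length := by omega
        rw [List.getD_eq_getElem _ _ (by omega), List.getD_eq_getElem _ _ (by rw [htlen]; omega)]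
        simp
      rw [this]
    rw [PySem.List.foldl_congr_mem' _ _ _ _ hcongr,
        PySem.List.foldl_pyRange_pyGetD (a.take n.toNat) 0 (fun p x => if PySem.Int.band po x = 0 then p + 1 else p) 0 (le_refl 0)]
    simp only [Int.toNat_zero, List.drop_zero]
    rw [PySem.List.foldl_ite_add_one]
    simp
  refine congrArg Prod.fst ?_
  refine PySem.List.foldl_congr_mem' _ _ _ _ ?_
  intro i hi st
  obtain ⟨hi0, hi30⟩ := PySem.List.mem_pyRange_neg_one.mp hi
  dsimp only
  rw [hinner]
  have hp : PySem.List.pyGetD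
      ((List.range 31).map
        (fun i => (fun _ => (0:Int)) i + (((a.take n.toNat).countP (fun x => PySem.Int.band ((2:Int) ^ i) x = 0) : Nat) : Int)))
      i 0
      = (((a.take n.toNat).countP (fun x => PySem.Int.band ((2:Int) ^ i.toNat) x = 0) : Nat) : Int) := by
    rw [PySem.List.pyGetD_of_nonneg _ 0 (by omega)]
    rw [List.getD_eq_getElem _ _ (by simp; omega)]
    simp
  rw [hp]

-- ===== VERDICT (by name: the statement is the Claim_ definition above) =====
theorem maximize_AND_spec : Claim_equal_maximize_AND := by
  intro n k a _hdom hpre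
  exact pv_main n k a hpre
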